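-- pv_equiv track=rewrite | github.com/lucasgcb/daily | challenges/Mai-28-19/Python/solution.py | GO
-- ===== SOURCE A (Python) =====
-- def GO(k,input_sequence,substrings_list):
--     # Procedurally go through input sequence and
--     # append the character to the substring.
--     # If the next character is not in the substring, reduce k by 1.
--     # Once the sequence is over, or k is below 0,
--     # end the sequence.
--     substring = ""
--     for next_character in input_sequence:
--         if next_character not in substring:
--             k-=1
--         if k<0:
--             return end(substrings_list,substring)
--         substring += next_character
--     return end(substrings_list,substring)
--
-- def end(substrings_list,substring):
--     # Append the substring into the substrings list.
--     # This works by reference so returning here doesn't actually do anything.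
--     substrings_list.append(substring)
--     return substrings_list
-- ===== SOURCE B (Python) =====
-- def GO(k, input_sequence, substrings_list):
--     # One pass to record the first-occurrence index of each distinct character,
--     # then cut the input at the first occurrence of the (k+1)-th distinct one.
--     seen = set()
--     first_idx = []
--     for i, c in enumerate(input_sequence):
--         if c not in seen:
--             seen.add(c)
--             first_idx.append(i)
--     if k < 0:
--         cut = 0
--     elif k < len(first_idx):
--         cut = first_idx[k]
--     else:
--         cut = len(input_sequence)
--     substrings_list.append(input_sequence[:cut])
--     return substrings_list
-- ===== Notes on version B (the rewrite author's own statement) =====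
-- stated objective: alternative
-- what changed: B replaces A's grow-a-substring scan with membership tests against the accumulated substring by a single enumerate pass that records each distinct character's first-occurrence index, then computes the cut position directly (0 for k<0, the k-th recorded index if it exists, else the full length) and slices the input once.
import Mathlib
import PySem

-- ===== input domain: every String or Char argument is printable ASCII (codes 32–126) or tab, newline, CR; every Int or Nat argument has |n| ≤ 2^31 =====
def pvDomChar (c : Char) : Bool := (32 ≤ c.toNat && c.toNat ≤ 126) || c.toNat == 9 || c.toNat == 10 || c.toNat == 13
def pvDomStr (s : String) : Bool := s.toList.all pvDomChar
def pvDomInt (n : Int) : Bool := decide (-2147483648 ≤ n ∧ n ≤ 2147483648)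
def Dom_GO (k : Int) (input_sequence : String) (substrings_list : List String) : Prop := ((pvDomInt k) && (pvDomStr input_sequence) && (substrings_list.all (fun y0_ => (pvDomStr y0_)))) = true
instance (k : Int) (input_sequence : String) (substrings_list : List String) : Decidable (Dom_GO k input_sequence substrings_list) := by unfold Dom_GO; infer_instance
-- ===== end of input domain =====

-- B replaces A's grow-a-substring scan with a single pass recording first-occurrence
-- indices of distinct characters, then a direct cut (objective: alternative decomposition).
-- Both A and B append to substrings_list in place; the equivalence is about the return value.


-- ===== PORT A =====
-- the for-loop of A: state (k, substring); returns the substring handed to end()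
def GOloopA (k : Int) (sub : List Char) : List Char → List Char
  | [] => sub
  | c :: rest =>
    let k' := if sub.contains c then k else k - 1   -- if next_character not in substring: k -= 1
    if k' < 0 then sub                               -- return end(substrings_list, substring)
    else GOloopA k' (sub ++ [c]) rest                -- substring += next_character

def GO (k : Int) (input_sequence : String) (substrings_list : List String) : List String :=
  substrings_list ++ [String.ofList (GOloopA k [] input_sequence.toList)]   -- end(): append and return

-- ===== PORT B =====
def GO_alt (k : Int) (input_sequence : String) (substrings_list : List String) : List String :=
  let st := (PySem.List.enumerate input_sequence.toList 0).foldl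
    (fun (st : PySem.Set Char × List Int) ic =>
      if st.1.contains ic.2 then st else (PySem.Set.add st.1 ic.2, st.2 ++ [ic.1]))
    (PySem.Set.empty, [])
  let first_idx := st.2
  let cut : Int :=
    if k < 0 then 0
    else if k < (first_idx.length : Int) then PySem.List.pyGetD first_idx k 0  -- in range by the guard
    else (input_sequence.toList.length : Int)                                  -- len(input_sequence)
  substrings_list ++ [String.ofList (input_sequence.toList.take cut.toNat)]        -- input_sequence[:cut], cut ≥ 0

-- ===== PRECONDITION & SPEC =====
def Spec_GO (k : Int) (input_sequence : String) (substrings_list : List String) (out : List String) : Prop := out = GO_alt k input_sequence substrings_list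
instance (k : Int) (input_sequence : String) (substrings_list : List String) (out : List String) : Decidable (Spec_GO k input_sequence substrings_list out) := by unfold Spec_GO; infer_instance

-- ===== CLAIM (what is proved, stated in full; the proofs are below) =====
def Claim_equal_GO : Prop := ∀ (k : Int) (input_sequence : String) (substrings_list : List String), Dom_GO k input_sequence substrings_list → Spec_GO k input_sequence substrings_list (GO k input_sequence substrings_list)

-- ===== LEMMAS AND PROOFS =====

-- proof-side: first-occurrence indices (within l) of the distinct chars of l not already in seen
def fidx (seen : List Char) : List Char → List Nat
  | [] => []
  | c :: rest =>
    if c ∈ seen then (fidx seen rest).map (· + 1)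
    else 0 :: (fidx (c :: seen) rest).map (· + 1)

-- proof-side: the length of the prefix A keeps, as a function of (k, seen)
def cutFrom (k : Int) (seen : List Char) : List Char → Nat
  | [] => 0
  | c :: rest =>
    if c ∈ seen then (if k < 0 then 0 else cutFrom k seen rest + 1)
    else (if k - 1 < 0 then 0 else cutFrom (k - 1) (c :: seen) rest + 1)

theorem fidx_congr (l : List Char) : ∀ (s s' : List Char), (∀ a, a ∈ s ↔ a ∈ s') →
    fidx s l = fidx s' l := by
  induction l with
  | nil => intro s s' _; rfl
  | cons c rest ih =>
    intro s s' h
    by_cases hc : c ∈ s'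
    · rw [fidx, fidx, if_pos ((h c).mpr hc), if_pos hc, ih s s' h]
    · rw [fidx, fidx, if_neg (fun hx => hc ((h c).mp hx)), if_neg hc]
      have : fidx (c :: s) rest = fidx (c :: s') rest := by
        apply ih; intro a; simp [h a]
      rw [this]

theorem cutFrom_congr (l : List Char) : ∀ (k : Int) (s s' : List Char), (∀ a, a ∈ s ↔ a ∈ s') →
    cutFrom k s l = cutFrom k s' l := by
  induction l with
  | nil => intro k s s' _; rfl
  | cons c rest ih =>
    intro k s s' h
    by_cases hc : c ∈ s'
    · rw [cutFrom, cutFrom, if_pos ((h c).mpr hc), if_pos hc, ih k s s' h]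
    · rw [cutFrom, cutFrom, if_neg (fun hx => hc ((h c).mp hx)), if_neg hc]
      have : cutFrom (k - 1) (c :: s) rest = cutFrom (k - 1) (c :: s') rest := by
        apply ih; intro a; simp [h a]
      rw [this]

-- A's loop returns the current substring extended by the computed prefix of the rest
theorem GOloopA_eq_take (l : List Char) : ∀ (k : Int) (sub : List Char),
    GOloopA k sub l = sub ++ l.take (cutFrom k sub l) := by
  induction l with
  | nil => intro k sub; simp [GOloopA, cutFrom]
  | cons c rest ih =>
    intro k sub
    by_cases hc : c ∈ sub
    · rw [GOloopA, cutFrom, if_pos hc]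
      rw [show sub.contains c = true from List.contains_iff_mem.mpr hc]
      rw [show (if true = true then k else k - 1) = k from if_pos rfl]
      by_cases hk : k < 0
      · simp [hk]
      · have hcut : cutFrom k (sub ++ [c]) rest = cutFrom k sub rest := by
          apply cutFrom_congr; intro a; simp; intro ha; subst ha; exact hc
        rw [if_neg hk, if_neg hk, ih k (sub ++ [c]), hcut, List.take_succ_cons,
          List.append_assoc, List.singleton_append]
    · rw [GOloopA, cutFrom, if_neg hc]
      rw [show sub.contains c = false from by simpa [List.contains_iff_mem] using hc]
      rw [show (if false = true then k else k - 1) = k - 1 from if_neg (by simp)]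
      by_cases hk : k - 1 < 0
      · simp [hk]
      · have hcut : cutFrom (k - 1) (sub ++ [c]) rest = cutFrom (k - 1) (c :: sub) rest := by
          apply cutFrom_congr; intro a; simp; tauto
        rw [if_neg hk, if_neg hk, ih (k - 1) (sub ++ [c]), hcut, List.take_succ_cons,
          List.append_assoc, List.singleton_append]

-- cutFrom is an index lookup into the first-occurrence indices
theorem cutFrom_eq_fidx (l : List Char) : ∀ (k : Int) (seen : List Char),
    cutFrom k seen l = if k < 0 then 0 else ((fidx seen l)[k.toNat]?).getD l.length := by
  induction l with
  | nil => intro k seen; simp [cutFrom, fidx]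
  | cons c rest ih =>
    intro k seen
    by_cases hc : c ∈ seen
    · rw [cutFrom, fidx, if_pos hc, if_pos hc]
      by_cases hk : k < 0
      · simp [hk]
      · rw [if_neg hk, if_neg hk, ih k seen, if_neg hk]
        cases hg : (fidx seen rest)[k.toNat]? with
        | none => simp [List.getElem?_map, hg]
        | some j => simp [List.getElem?_map, hg]
    · rw [cutFrom, fidx, if_neg hc, if_neg hc]
      by_cases hk : k < 0
      · simp [hk, show k - 1 < 0 by omega]
      · by_cases hk0 : k = 0
        · subst hk0; simp
        · have hk1 : ¬ k - 1 < 0 := by omega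
          have hn : k.toNat = (k - 1).toNat + 1 := by omega
          rw [if_neg hk1, if_neg hk, hn, List.getElem?_cons_succ, ih (k - 1) (c :: seen),
            if_neg hk1, List.getElem?_map]
          cases hg : (fidx (c :: seen) rest)[(k - 1).toNat]? with
          | none => simp
          | some j => simp

-- B's fold computes the first-occurrence indices (shifted by the start index, cast to Int)
theorem foldB_eq_fidx (l : List Char) : ∀ (S : PySem.Set Char) (acc : List Int) (i : Nat),
    ((PySem.List.enumerate l (i : Int)).foldl
      (fun (st : PySem.Set Char × List Int) ic =>
        if st.1.contains ic.2 then st else (PySem.Set.add st.1 ic.2, st.2 ++ [ic.1])) (S, acc)).2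
    = acc ++ (fidx S l).map (fun n => ((i + n : Nat) : Int)) := by
  induction l with
  | nil => intro S acc i; simp [PySem.List.enumerate_nil, fidx]
  | cons c rest ih =>
    intro S acc i
    rw [PySem.List.enumerate_cons, List.foldl_cons]
    dsimp only
    by_cases hc : c ∈ S
    · rw [if_pos (show S.contains c = true by simp [pysem, hc])]
      have hcast : ((i : Int) + 1) = ((i + 1 : Nat) : Int) := by push_cast; ring
      rw [hcast, ih S acc (i + 1)]
      rw [fidx, if_pos hc, List.map_map]
      congr 1
      apply List.map_congr_left; intro a _
      simp only [Function.comp_apply]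
      omega
    · rw [if_neg (show ¬ S.contains c = true by simp [pysem, hc])]
      have hadd : PySem.Set.add S c = S ++ [c] := by
        rw [PySem.Set.add, if_neg (show ¬ S.contains c = true by simp [pysem, hc])]
      have hcast : ((i : Int) + 1) = ((i + 1 : Nat) : Int) := by push_cast; ring
      rw [hadd, hcast, ih (S ++ [c]) (acc ++ [(i : Int)]) (i + 1)]
      have hfc : fidx (S ++ [c]) rest = fidx (c :: S) rest := by
        apply fidx_congr; intro a; simp; tauto
      rw [fidx, if_neg hc, hfc, List.map_cons, List.map_map, List.append_assoc,
        List.singleton_append]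
      congr 1
      refine List.cons_eq_cons.mpr ⟨by omega, ?_⟩
      apply List.map_congr_left; intro a _
      simp only [Function.comp_apply]
      omega

-- ===== VERDICT (by name: the statement is the Claim_ definition above) =====
theorem GO_spec : Claim_equal_GO := by
  intro k s lst _
  unfold Spec_GO GO GO_alt
  have hfold := foldB_eq_fidx s.toList PySem.Set.empty [] 0
  simp only [Nat.cast_zero, Nat.zero_add, List.nil_append] at hfold
  rw [show fidx PySem.Set.empty s.toList = fidx [] s.toList from rfl] at hfold
  simp only [hfold, GOloopA_eq_take, List.nil_append, List.length_map]
  congr 2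
  rw [cutFrom_eq_fidx]
  by_cases hk : k < 0
  · simp [hk]
  · rw [if_neg hk, if_neg hk]
    by_cases hlt : k < ((fidx [] s.toList).length : Int)
    · have hlen : k.toNat < (fidx [] s.toList).length := by omega
      rw [if_pos hlt,
        PySem.List.pyGetD_eq_getElem (List.map (fun n : Nat => (n : Int)) (fidx [] s.toList)) 0
          (by omega) (by simpa using hlt)]
      simp [List.getElem_map, hlen]
    · rw [if_neg hlt]
      have hnone : (fidx [] s.toList)[k.toNat]? = none :=
        List.getElem?_eq_none (by omega)
      rw [hnone]
      simp
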